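-- pv_equiv track=rewrite | github.com/Provenance-Emu/skins | scripts/generate_author_pages.py | prefer_own_thumbnail
-- ===== SOURCE A (Python) =====
-- def prefer_own_thumbnail(skins):
--     """Prefer thumbnails hosted in the skins repo (most reliable, no hotlink protection)."""
--     own = next(
--         (s["thumbnailURL"] for s in skins
--          if s.get("thumbnailURL") and "Provenance-Emu/skins" in s["thumbnailURL"]),
--         None,
--     )
--     if own:
--         return own
--     return next((s["thumbnailURL"] for s in skins if s.get("thumbnailURL")), "")
-- ===== SOURCE B (Python) =====
-- def prefer_own_thumbnail(skins):
--     """Prefer thumbnails hosted in the skins repo (most reliable, no hotlink protection)."""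
--     fallback = None
--     for s in skins:
--         url = s.get("thumbnailURL")
--         if url:
--             if "Provenance-Emu/skins" in url:
--                 return url
--             if fallback is None:
--                 fallback = url
--     return fallback if fallback is not None else ""
-- ===== Notes on version B (the rewrite author's own statement) =====
-- stated objective: simpler
-- what changed: Replaced A's two separate generator scans (one for repo-hosted URLs, one for any valid URL) with a single explicit pass that returns a repo-hosted URL immediately and keeps the first valid URL as a fallback.
import Mathlib
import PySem

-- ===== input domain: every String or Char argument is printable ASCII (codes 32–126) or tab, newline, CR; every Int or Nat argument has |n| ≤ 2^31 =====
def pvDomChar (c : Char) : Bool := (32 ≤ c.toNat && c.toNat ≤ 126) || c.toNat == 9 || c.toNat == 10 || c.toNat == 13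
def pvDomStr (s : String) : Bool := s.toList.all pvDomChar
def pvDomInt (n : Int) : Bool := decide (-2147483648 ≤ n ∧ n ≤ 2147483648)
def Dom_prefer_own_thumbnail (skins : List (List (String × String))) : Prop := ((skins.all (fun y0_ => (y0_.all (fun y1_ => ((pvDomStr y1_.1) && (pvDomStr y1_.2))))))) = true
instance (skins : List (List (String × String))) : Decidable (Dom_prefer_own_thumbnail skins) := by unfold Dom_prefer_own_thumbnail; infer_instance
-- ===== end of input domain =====

-- B is a single explicit pass with a fallback accumulator instead of A's two generator scans (objective: simpler).

-- ===== PORT A =====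
-- s.get("thumbnailURL") on the association list (first match, like a Python dict lookup)
def pvGetThumb (s : List (String × String)) : Option String := s.lookup "thumbnailURL"

-- first generator: first truthy thumbnailURL containing "Provenance-Emu/skins"
def pvFirstOwn (skins : List (List (String × String))) : Option String :=
  skins.findSome? (fun s =>
    match pvGetThumb s with
    | some v => if v ≠ "" && PySem.Str.isIn "Provenance-Emu/skins" v then some v else none
    | none => none)

-- second generator: first truthy thumbnailURL
def pvFirstAny (skins : List (List (String × String))) : Option String :=
  skins.findSome? (fun s =>
    match pvGetThumb s with
    | some v => if v ≠ "" then some v else none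
    | none => none)

def prefer_own_thumbnail (skins : List (List (String × String))) : String :=
  match pvFirstOwn skins with
  | some own => if own ≠ "" then own else (pvFirstAny skins).getD ""
  | none => (pvFirstAny skins).getD ""

-- ===== PORT B =====
-- single pass: return immediately on a repo-hosted URL, remember the first valid URL as fallback
def prefer_own_thumbnail_altLoop : List (List (String × String)) → Option String → String
  | [], fallback => fallback.getD ""
  | s :: rest, fallback =>
    match s.lookup "thumbnailURL" with
    | some url =>
      if url ≠ "" then
        if PySem.Str.isIn "Provenance-Emu/skins" url then url
        else prefer_own_thumbnail_altLoop rest (if fallback.isNone then some url else fallback)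
      else prefer_own_thumbnail_altLoop rest fallback
    | none => prefer_own_thumbnail_altLoop rest fallback

def prefer_own_thumbnail_alt (skins : List (List (String × String))) : String :=
  prefer_own_thumbnail_altLoop skins none

-- ===== PRECONDITION & SPEC =====
def Spec_prefer_own_thumbnail (skins : List (List (String × String))) (out : String) : Prop := out = prefer_own_thumbnail_alt skins
instance (skins : List (List (String × String))) (out : String) : Decidable (Spec_prefer_own_thumbnail skins out) := by unfold Spec_prefer_own_thumbnail; infer_instance

-- ===== CLAIM (what is proved, stated in full; the proofs are below) =====
def Claim_equal_prefer_own_thumbnail : Prop := ∀ (skins : List (List (String × String))), Dom_prefer_own_thumbnail skins → Spec_prefer_own_thumbnail skins (prefer_own_thumbnail skins)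

-- ===== LEMMAS AND PROOFS =====

-- cons unfoldings of the two generator scans
theorem firstOwn_cons (s : List (String × String)) (rest : List (List (String × String))) :
    pvFirstOwn (s :: rest) =
      (match pvGetThumb s with
       | some v => if v ≠ "" && PySem.Str.isIn "Provenance-Emu/skins" v then some v else none
       | none => none).or (pvFirstOwn rest) := by
  simp only [pvFirstOwn, List.findSome?_cons]
  cases pvGetThumb s with
  | none => simp
  | some v =>
    by_cases h : (decide (v ≠ "") && PySem.Str.isIn "Provenance-Emu/skins" v) = true <;>
      simp only [h, if_true, if_false, Bool.false_eq_true, Option.or]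

theorem firstAny_cons (s : List (String × String)) (rest : List (List (String × String))) :
    pvFirstAny (s :: rest) =
      (match pvGetThumb s with
       | some v => if v ≠ "" then some v else none
       | none => none).or (pvFirstAny rest) := by
  simp only [pvFirstAny, List.findSome?_cons]
  cases pvGetThumb s with
  | none => simp
  | some v =>
    by_cases h : v = "" <;> simp [h, Option.or]

-- loop invariant: the fallback-threaded loop equals A's two-scan formulation
theorem altLoop_eq (skins : List (List (String × String))) :
    ∀ (fallback : Option String),
      prefer_own_thumbnail_altLoop skins fallback =
        match pvFirstOwn skins with
        | some own => own
        | none =>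
          match fallback with
          | some f => f
          | none => (pvFirstAny skins).getD "" := by
  induction skins with
  | nil =>
    intro fallback
    cases fallback <;> simp [prefer_own_thumbnail_altLoop, pvFirstOwn, pvFirstAny, Option.getD]
  | cons s rest ih =>
    intro fallback
    rw [firstOwn_cons, firstAny_cons]
    simp only [prefer_own_thumbnail_altLoop, pvGetThumb]
    cases h : List.lookup "thumbnailURL" s with
    | none => simp [ih fallback]
    | some url =>
      dsimp only
      by_cases hne : url = ""
      · simp [hne, ih fallback]
      · by_cases hown : PySem.Str.isIn "Provenance-Emu/skins" url = true
        · have hc := hown; simp at hc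
          simp [hne, hc, Option.or]
        · have hc := hown; simp at hc
          rw [if_pos (by simp [hne]), if_neg (by simpa using hc), ih]
          cases fallback <;> simp [hne, hc, Option.or]

theorem prefer_own_thumbnail_eq (skins : List (List (String × String))) :
    prefer_own_thumbnail skins = prefer_own_thumbnail_alt skins := by
  unfold prefer_own_thumbnail prefer_own_thumbnail_alt
  rw [altLoop_eq skins none]
  cases h : pvFirstOwn skins with
  | none => simp
  | some own =>
    -- any value produced by pvFirstOwn is nonempty
    have hne : own ≠ "" := by
      unfold pvFirstOwn at h
      obtain ⟨s, _, hs⟩ := List.exists_of_findSome?_eq_some h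
      cases hl : pvGetThumb s with
      | none => rw [hl] at hs; simp at hs
      | some v =>
        rw [hl] at hs
        dsimp only at hs
        by_cases hc : (decide (v ≠ "") && PySem.Str.isIn "Provenance-Emu/skins" v) = true
        · rw [if_pos hc] at hs
          cases hs
          simp only [Bool.and_eq_true, decide_eq_true_eq] at hc
          exact hc.1
        · rw [if_neg hc] at hs
          cases hs
    simp [hne]

-- ===== VERDICT (by name: the statement is the Claim_ definition above) =====
theorem prefer_own_thumbnail_spec : Claim_equal_prefer_own_thumbnail := by
  intro skins _
  unfold Spec_prefer_own_thumbnail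
  exact prefer_own_thumbnail_eq skins
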